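-- pv_equiv track=rewrite | github.com/jianningzhuang/CS1010X-Programming_Methodology | Midterms/Midterm Practice Part 1.py | divisible_by_11
-- ===== SOURCE A (Python) =====
-- def divisible_by_11(num):
--     def difference(num):
--         if num < 10:
--             return num
--         else:
--             return num%10 - difference(num//10)
--     if difference(num) == 0:
--         return True
--     elif difference(num) > 10:
--         return divisible_by_11(difference(num))
--     else:
--         return False
-- ===== SOURCE B (Python) =====
-- def divisible_by_11(num):
--     # iterative version: explicit loops instead of the two recursions of A
--     while True:
--         if num < 10:
--             return num == 0
--         sign, acc, n = 1, 0, num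
--         while n >= 10:
--             acc += sign * (n % 10)
--             sign = -sign
--             n //= 10
--         d = acc + sign * n
--         if d == 0:
--             return True
--         if d <= 10:
--             return False
--         num = d
-- ===== Notes on version B (the rewrite author's own statement) =====
-- stated objective: alternative
-- what changed: Both recursions of A (the alternating-digit-sum helper and the outer reduce-and-retest) are replaced by explicit iterative loops with a running sign/accumulator and a while-True driver.
import Mathlib
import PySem

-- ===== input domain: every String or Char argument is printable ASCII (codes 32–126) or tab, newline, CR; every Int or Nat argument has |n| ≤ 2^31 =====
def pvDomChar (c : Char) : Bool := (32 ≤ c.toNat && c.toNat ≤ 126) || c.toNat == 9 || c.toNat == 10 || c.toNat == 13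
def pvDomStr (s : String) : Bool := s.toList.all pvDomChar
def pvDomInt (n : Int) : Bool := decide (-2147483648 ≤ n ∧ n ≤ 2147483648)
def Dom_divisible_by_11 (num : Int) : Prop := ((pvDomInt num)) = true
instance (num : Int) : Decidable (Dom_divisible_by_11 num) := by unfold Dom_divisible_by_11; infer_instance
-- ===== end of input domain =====

-- B replaces A's two recursions (digit alternating-sum helper and outer retest) by explicit
-- iterative loops with a running sign/accumulator; same results on every int (objective:
-- alternative decomposition). Both ports carry a fuel counter only to make the recursion
-- structural; the fuel (num.toNat + 1) is never exhausted on the recursions the Python performs.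

-- ===== PORT A =====
-- inner helper `difference` of A (fuel = extra guard making the recursion structural)
def pvDifferenceGo : Nat → Int → Int
  | 0, num => num
  | fuel+1, num =>
    if num < 10 then num
    else PySem.Int.mod num 10 - pvDifferenceGo fuel (PySem.Int.floordiv num 10)

def pvDifference (num : Int) : Int := pvDifferenceGo num.toNat num

-- outer recursion of A
def pvDivGo : Nat → Int → Bool
  | 0, _ => false
  | fuel+1, num =>
    if pvDifference num = 0 then true
    else if pvDifference num > 10 then pvDivGo fuel (pvDifference num)
    else false

def divisible_by_11 (num : Int) : Bool := pvDivGo (num.toNat + 1) num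

-- ===== PORT B =====
-- B's inner while-loop: running sign and accumulator over the digits (fuel as above)
def pvAltLoopGo : Nat → Int → Int → Int → Int
  | 0, sign, acc, n => acc + sign * n
  | fuel+1, sign, acc, n =>
    if n ≥ 10 then pvAltLoopGo fuel (-sign) (acc + sign * PySem.Int.mod n 10) (PySem.Int.floordiv n 10)
    else acc + sign * n

def pvAltLoop (sign acc n : Int) : Int := pvAltLoopGo n.toNat sign acc n

-- B's outer while-True loop
def pvAltGo : Nat → Int → Bool
  | 0, _ => false
  | fuel+1, num =>
    if num < 10 then num == 0
    else
      let d := pvAltLoop 1 0 num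
      if d = 0 then true
      else if d ≤ 10 then false
      else pvAltGo fuel d

def divisible_by_11_alt (num : Int) : Bool := pvAltGo (num.toNat + 1) num

-- ===== PRECONDITION & SPEC =====
def Spec_divisible_by_11 (num : Int) (out : Bool) : Prop := out = divisible_by_11_alt num
instance (num : Int) (out : Bool) : Decidable (Spec_divisible_by_11 num out) := by unfold Spec_divisible_by_11; infer_instance

-- ===== CLAIM (what is proved, stated in full; the proofs are below) =====
def Claim_equal_divisible_by_11 : Prop := ∀ (num : Int), Dom_divisible_by_11 num → Spec_divisible_by_11 num (divisible_by_11 num)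

-- ===== LEMMAS AND PROOFS =====
-- B's inner loop computes acc + sign * (A's `difference`), fuel for fuel
theorem pvAltLoopGo_eq (fuel : Nat) : ∀ (sign acc n : Int),
    pvAltLoopGo fuel sign acc n = acc + sign * pvDifferenceGo fuel n := by
  induction fuel with
  | zero => intro sign acc n; rfl
  | succ fuel ih =>
    intro sign acc n
    rw [pvAltLoopGo, pvDifferenceGo]
    by_cases h10 : n ≥ 10
    · rw [if_pos h10, if_neg (by omega : ¬ n < 10), ih]
      ring
    · rw [if_neg h10, if_pos (by omega : n < 10)]

theorem pvAltLoop_one_zero (n : Int) : pvAltLoop 1 0 n = pvDifference n := by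
  rw [pvAltLoop, pvDifference, pvAltLoopGo_eq]
  ring

-- `difference` of a single-digit (or negative) number is the number itself, whatever the fuel
theorem pvDifferenceGo_small (fuel : Nat) (n : Int) (h : n < 10) :
    pvDifferenceGo fuel n = n := by
  cases fuel with
  | zero => rfl
  | succ fuel => rw [pvDifferenceGo, if_pos h]

-- the two outer loops agree fuel for fuel
theorem pvGo_eq (fuel : Nat) : ∀ (num : Int), pvDivGo fuel num = pvAltGo fuel num := by
  induction fuel with
  | zero => intro num; rfl
  | succ fuel ih =>
    intro num
    rw [pvDivGo, pvAltGo]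
    by_cases h10 : num < 10
    · rw [show pvDifference num = num from pvDifferenceGo_small _ _ h10]
      by_cases h0 : num = 0
      · simp [h0]
      · rw [if_neg h0, if_neg (by omega : ¬ num > 10), if_pos h10,
            show (num == 0) = false from by simp [h0]]
    · rw [if_neg h10]
      simp only [pvAltLoop_one_zero]
      by_cases h0 : pvDifference num = 0
      · rw [if_pos h0, if_pos h0]
      · rw [if_neg h0, if_neg h0]
        by_cases hgt : pvDifference num > 10
        · rw [if_pos hgt, if_neg (by omega : ¬ pvDifference num ≤ 10)]
          exact ih (pvDifference num)
        · rw [if_neg hgt, if_pos (by omega : pvDifference num ≤ 10)]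

-- ===== VERDICT (by name: the statement is the Claim_ definition above) =====
theorem divisible_by_11_spec : Claim_equal_divisible_by_11 := by
  intro num _
  unfold Spec_divisible_by_11 divisible_by_11 divisible_by_11_alt
  exact pvGo_eq (num.toNat + 1) num
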